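-- pv_equiv track=rewrite | github.com/mikejmcguirk/Advent-of-Code | 2024_py/02/part_two.py | window_scan
-- ===== SOURCE A (Python) =====
-- def window_scan(nums):
--     correct_gap = all(abs(a - b) > 0 and abs(a - b) < 4 for a, b in zip(nums, nums[1:]))
--     if not correct_gap:
--         return False
--
--     all_increasing = all(b > a for a, b in zip(nums, nums[1:]))
--     all_decreasing = all(b < a for a, b in zip(nums, nums[1:]))
--     if not (all_increasing or all_decreasing):
--         return False
--
--     return True
-- ===== SOURCE B (Python) =====
-- def window_scan(nums):
--     if len(nums) < 2:
--         return True
--     up = nums[1] > nums[0]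
--     prev = nums[0]
--     for b in nums[1:]:
--         d = b - prev
--         if not (1 <= abs(d) <= 3) or (d > 0) != up:
--             return False
--         prev = b
--     return True
-- ===== Notes on version B (the rewrite author's own statement) =====
-- stated objective: simpler
-- what changed: B replaces A's three separate all() passes over the pair list with a single early-exit scan that keeps only the direction sign from the first pair, checking gap and monotonicity together.
import Mathlib
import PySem

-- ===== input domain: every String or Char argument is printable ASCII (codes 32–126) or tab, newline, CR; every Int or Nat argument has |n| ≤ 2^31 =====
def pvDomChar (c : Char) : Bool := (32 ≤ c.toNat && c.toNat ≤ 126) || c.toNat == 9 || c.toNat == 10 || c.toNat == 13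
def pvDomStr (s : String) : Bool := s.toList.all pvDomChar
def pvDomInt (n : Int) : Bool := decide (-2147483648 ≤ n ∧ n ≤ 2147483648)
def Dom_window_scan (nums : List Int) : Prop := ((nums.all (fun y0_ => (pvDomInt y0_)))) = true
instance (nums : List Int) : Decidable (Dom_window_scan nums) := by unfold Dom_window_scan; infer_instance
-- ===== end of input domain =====

-- B merges A's three all() passes into one early-exit scan keeping only the direction sign (objective: simpler).

-- ===== PORT A =====
def window_scan (nums : List Int) : Bool :=
  let pairs := nums.zip nums.tail
  let correct_gap := pairs.all (fun p => |p.1 - p.2| > 0 && |p.1 - p.2| < 4)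
  if !correct_gap then false
  else
    let all_increasing := pairs.all (fun p => p.2 > p.1)
    let all_decreasing := pairs.all (fun p => p.2 < p.1)
    if !(all_increasing || all_decreasing) then false
    else true

-- ===== PORT B =====
def wsLoop (up : Bool) (prev : Int) (rest : List Int) : Bool :=
  match rest with
  | [] => true
  | b :: t =>
    let d := b - prev
    if !(1 ≤ |d| && |d| ≤ 3) || (decide (d > 0) != up) then false
    else wsLoop up b t

def window_scan_alt (nums : List Int) : Bool :=
  match nums with
  | [] => true
  | [_] => true
  | a :: b :: t => wsLoop (decide (b > a)) a (b :: t)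

-- ===== PRECONDITION & SPEC =====
def Spec_window_scan (nums : List Int) (out : Bool) : Prop := out = window_scan_alt nums
instance (nums : List Int) (out : Bool) : Decidable (Spec_window_scan nums out) := by unfold Spec_window_scan; infer_instance

-- ===== CLAIM (what is proved, stated in full; the proofs are below) =====
def Claim_equal_window_scan : Prop := ∀ (nums : List Int), Dom_window_scan nums → Spec_window_scan nums (window_scan nums)

-- ===== LEMMAS AND PROOFS =====

theorem wsGuard (d : Int) (up : Bool) :
    (!(decide ((1:Int) ≤ |d|) && decide (|d| ≤ 3)) || (decide (d > 0) != up)) =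
      !decide ((1 ≤ |d| ∧ |d| ≤ 3) ∧ (0 < d ↔ up = true)) := by
  by_cases h1 : (1:Int) ≤ |d| <;> by_cases h2 : |d| ≤ 3 <;> by_cases h3 : 0 < d <;>
    cases up <;> simp [h1, h2, h3]

theorem wsLoop_eq_true (up : Bool) (prev : Int) (rest : List Int) :
    wsLoop up prev rest = true ↔
      ∀ p ∈ (prev :: rest).zip rest,
        (1 ≤ |p.2 - p.1| ∧ |p.2 - p.1| ≤ 3) ∧ (0 < p.2 - p.1 ↔ up = true) := by
  induction rest generalizing prev with
  | nil => simp [wsLoop]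
  | cons b t ih =>
    show (if _ then false else wsLoop up b t) = true ↔ _
    rw [wsGuard (b - prev) up]
    by_cases hP : (1 ≤ |b - prev| ∧ |b - prev| ≤ 3) ∧ (0 < b - prev ↔ up = true)
    · rw [if_neg (by rw [decide_eq_true hP]; simp), ih]
      simp only [List.zip_cons_cons, List.mem_cons]
      constructor
      · rintro hall p (rfl | hp)
        · exact hP
        · exact hall p hp
      · intro hall p hp
        exact hall p (Or.inr hp)
    · rw [if_pos (by rw [decide_eq_false hP]; simp)]
      simp only [Bool.false_eq_true, false_iff, not_forall, List.zip_cons_cons,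
        List.mem_cons]
      exact ⟨(prev, b), ⟨by simp, hP⟩⟩

theorem windowA_eq_true (nums : List Int) :
    window_scan nums = true ↔
      (∀ p ∈ nums.zip nums.tail, 0 < |p.1 - p.2| ∧ |p.1 - p.2| < 4) ∧
      ((∀ p ∈ nums.zip nums.tail, p.1 < p.2) ∨ (∀ p ∈ nums.zip nums.tail, p.2 < p.1)) := by
  simp only [window_scan]
  split_ifs with h1 h2
  · simp only [Bool.not_eq_true', List.all_eq_false] at h1
    obtain ⟨p, hp, hpf⟩ := h1
    simp only [Bool.and_eq_true, decide_eq_true_eq, not_and_or, not_lt] at hpf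
    constructor
    · intro hf; exact absurd hf (by decide)
    · rintro ⟨hgap, -⟩
      have := hgap p hp
      omega
  · simp only [Bool.not_eq_true', Bool.or_eq_false_iff, List.all_eq_false] at h2
    obtain ⟨⟨p, hp, hpf⟩, ⟨q, hq, hqf⟩⟩ := h2
    simp only [decide_eq_true_eq, not_lt] at hpf hqf
    constructor
    · intro hf; exact absurd hf (by decide)
    · rintro ⟨-, hmono | hmono⟩
      · have := hmono p hp; omega
      · have := hmono q hq; omega
  · simp only [Bool.not_eq_true', Bool.not_eq_false, Bool.or_eq_true,
      List.all_eq_true] at h1 h2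
    constructor
    · intro _
      refine ⟨fun p hp => ?_, ?_⟩
      · have := h1 p hp; simp only [Bool.and_eq_true, decide_eq_true_eq] at this; exact this
      · rcases h2 with h | h
        · left; intro p hp; have := h p hp; simpa using this
        · right; intro p hp; have := h p hp; simpa using this
    · intro _; rfl

theorem window_scan_spec' (nums : List Int) : window_scan nums = window_scan_alt nums := by
  match nums with
  | [] => rfl
  | [_] => rfl
  | a :: b :: t =>
    rw [Bool.eq_iff_iff, windowA_eq_true]
    show _ ↔ wsLoop (decide (b > a)) a (b :: t) = true
    rw [wsLoop_eq_true]
    have hmem : (a, b) ∈ (a :: b :: t).zip (b :: t) := by simp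
    simp only [List.tail_cons]
    constructor
    · rintro ⟨hgap, hmono⟩ p hp
      have hg := hgap p hp
      rcases abs_cases (p.1 - p.2) with ⟨e1, s1⟩ | ⟨e1, s1⟩ <;>
        rcases abs_cases (p.2 - p.1) with ⟨e2, s2⟩ | ⟨e2, s2⟩ <;>
      · rcases hmono with h | h <;>
        · have h1 := h p hp
          have h2 := h (a, b) hmem
          simp only [decide_eq_true_eq, gt_iff_lt]
          omega
    · intro hall
      have hab := (hall (a, b) hmem)
      simp only [decide_eq_true_eq, gt_iff_lt] at hab
      constructor
      · intro p hp
        have h := (hall p hp).1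
        rcases abs_cases (p.1 - p.2) with ⟨e1, s1⟩ | ⟨e1, s1⟩ <;>
          rcases abs_cases (p.2 - p.1) with ⟨e2, s2⟩ | ⟨e2, s2⟩ <;> omega
      · by_cases hba : a < b
        · left; intro p hp
          have h := hall p hp
          simp only [decide_eq_true_eq, gt_iff_lt] at h
          have := h.2.mpr (by simpa using hba)
          omega
        · right; intro p hp
          have h := hall p hp
          simp only [decide_eq_true_eq, gt_iff_lt] at h
          have hnp : ¬ (0 < p.2 - p.1) := fun hc => hba (by have := h.2.mp hc; simpa using this)
          rcases abs_cases (p.2 - p.1) with ⟨e2, s2⟩ | ⟨e2, s2⟩ <;>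
          · have h1 := h.1
            omega

-- ===== VERDICT (by name: the statement is the Claim_ definition above) =====
theorem window_scan_spec : Claim_equal_window_scan := by
  intro nums _
  exact window_scan_spec' nums
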